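-- pv_equiv track=rewrite | github.com/AvoCloud-net/Baxi | assets/trust.py | _worst_tier
-- ===== SOURCE A (Python) =====
-- SEVERITY_TIERS: dict[str, str] = {
--     "chatfilter_phishing":  "critical",
--     "ban":                  "critical",
--     "chatfilter_hate":      "severe",
--     "chatfilter_violation": "high",
--     "kick":                 "medium",
--     "antispam":             "low",
--     "warning":              "minor",
--     "chatfilter_mild":      "minimal",
-- }
--
-- _TIER_ORDER = ["critical", "severe", "high", "medium", "low", "minor", "minimal"]
--
-- def _worst_tier(events: list) -> str:
--     """Return the worst severity tier present in the event list."""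
--     worst_idx = len(_TIER_ORDER) - 1
--     worst     = _TIER_ORDER[worst_idx]
--     for event in events:
--         tier = SEVERITY_TIERS.get(event.get("type", ""), "low")
--         idx  = _TIER_ORDER.index(tier) if tier in _TIER_ORDER else worst_idx
--         if idx < worst_idx:
--             worst     = tier
--             worst_idx = idx
--     return worst
-- ===== SOURCE B (Python) =====
-- SEVERITY_TIERS: dict[str, str] = {
--     "chatfilter_phishing":  "critical",
--     "ban":                  "critical",
--     "chatfilter_hate":      "severe",
--     "chatfilter_violation": "high",
--     "kick":                 "medium",
--     "antispam":             "low",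
--     "warning":              "minor",
--     "chatfilter_mild":      "minimal",
-- }
--
-- _TIER_ORDER = ["critical", "severe", "high", "medium", "low", "minor", "minimal"]
--
-- def _worst_tier(events: list) -> str:
--     """Return the worst severity tier present in the event list."""
--     present = {SEVERITY_TIERS.get(event.get("type", ""), "low") for event in events}
--     for tier in _TIER_ORDER:
--         if tier in present:
--             return tier
--     return _TIER_ORDER[-1]
-- ===== Notes on version B (the rewrite author's own statement) =====
-- stated objective: idiomatic
-- what changed: Replaced the running-minimum index loop with a two-phase pass: build the set of severity tiers present, then return the first tier of the fixed priority order that is in the set (falling back to the last tier).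
import Mathlib
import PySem

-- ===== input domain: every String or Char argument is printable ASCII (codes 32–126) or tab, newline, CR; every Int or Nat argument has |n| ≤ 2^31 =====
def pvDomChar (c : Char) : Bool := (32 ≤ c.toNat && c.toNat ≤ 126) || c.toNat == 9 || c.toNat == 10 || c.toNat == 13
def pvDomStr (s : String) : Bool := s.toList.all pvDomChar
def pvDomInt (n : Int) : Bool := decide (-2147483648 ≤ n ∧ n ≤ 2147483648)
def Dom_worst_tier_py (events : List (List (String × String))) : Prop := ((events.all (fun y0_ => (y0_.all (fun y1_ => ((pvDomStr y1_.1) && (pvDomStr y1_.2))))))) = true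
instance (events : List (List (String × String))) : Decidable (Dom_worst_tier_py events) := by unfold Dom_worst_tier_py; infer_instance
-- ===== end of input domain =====

-- B replaces A's running-minimum loop with a set of present tiers scanned in priority order (idiomatic; same result).

-- ===== PORT A =====
def sevTiers : PySem.Dict String String := PySem.Dict.mk
  [("chatfilter_phishing", "critical"), ("ban", "critical"), ("chatfilter_hate", "severe"),
   ("chatfilter_violation", "high"), ("kick", "medium"), ("antispam", "low"),
   ("warning", "minor"), ("chatfilter_mild", "minimal")]

def tierOrder : List String := ["critical", "severe", "high", "medium", "low", "minor", "minimal"]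

def worst_tier_py (events : List (List (String × String))) : String :=
  -- worst_idx = len(_TIER_ORDER) - 1 ; worst = _TIER_ORDER[worst_idx]
  let worst_idx : Nat := tierOrder.length - 1
  let worst : String := tierOrder.getD worst_idx ""
  let st := events.foldl (fun (st : String × Nat) event =>
      let tier := sevTiers.getD ((PySem.Dict.mk event).getD "type" "") "low"
      -- idx = _TIER_ORDER.index(tier) if tier in _TIER_ORDER else worst_idx
      let idx : Nat := match PySem.List.index? tierOrder tier with
        | some i => i
        | none => st.2
      if idx < st.2 then (tier, idx) else st) (worst, worst_idx)
  st.1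

-- ===== PORT B =====
-- 'for tier in _TIER_ORDER: if tier in present: return tier / return _TIER_ORDER[-1]'
def scanTiers (present : PySem.Set String) : List String → String
  | [] => tierOrder.getLastD ""   -- _TIER_ORDER[-1]; exact since tierOrder is nonempty
  | t :: ts => if PySem.Set.contains present t then t else scanTiers present ts

def worst_tier_py_alt (events : List (List (String × String))) : String :=
  let present : PySem.Set String :=
    PySem.Set.ofList (events.map (fun event =>
      sevTiers.getD ((PySem.Dict.mk event).getD "type" "") "low"))
  scanTiers present tierOrder

-- ===== PRECONDITION & SPEC =====
def Spec_worst_tier_py (events : List (List (String × String))) (out : String) : Prop := out = worst_tier_py_alt events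
instance (events : List (List (String × String))) (out : String) : Decidable (Spec_worst_tier_py events out) := by unfold Spec_worst_tier_py; infer_instance

-- ===== CLAIM (what is proved, stated in full; the proofs are below) =====
def Claim_equal_worst_tier_py : Prop := ∀ (events : List (List (String × String))), Dom_worst_tier_py events → Spec_worst_tier_py events (worst_tier_py events)

-- ===== LEMMAS AND PROOFS =====

-- the tier computed for one event, and its index in tierOrder
def tierOf (event : List (String × String)) : String :=
  sevTiers.getD ((PySem.Dict.mk event).getD "type" "") "low"

def tidx (event : List (String × String)) : Nat := tierOrder.idxOf (tierOf event)

lemma tierOf_mem (e : List (String × String)) : tierOf e ∈ tierOrder := by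
  unfold tierOf
  rcases h : sevTiers.get? ((PySem.Dict.mk e).getD "type" "") with _ | w
  · rw [PySem.Dict.getD_eq_get?_getD, h]; decide
  · rw [PySem.Dict.getD_eq_get?_getD, h]
    simp only [Option.getD_some]
    have hm := PySem.Dict.mem_items_of_get?_eq_some _ h
    simp only [sevTiers, PySem.Dict.items] at hm
    simp only [List.mem_cons, List.not_mem_nil, or_false, Prod.mk.injEq] at hm
    rcases hm with ⟨_, rfl⟩|⟨_, rfl⟩|⟨_, rfl⟩|⟨_, rfl⟩|⟨_, rfl⟩|⟨_, rfl⟩|⟨_, rfl⟩|⟨_, rfl⟩ <;> decide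

lemma tier_spec (e : List (String × String)) :
    tidx e ≤ 6 ∧ PySem.List.index? tierOrder (tierOf e) = some (tidx e) ∧
      tierOrder.getD (tidx e) "" = tierOf e := by
  have h := tierOf_mem e
  simp only [tierOrder, List.mem_cons, List.not_mem_nil, or_false] at h
  unfold tidx
  rcases h with ht|ht|ht|ht|ht|ht|ht <;> rw [ht] <;> exact ⟨by decide, by decide, by decide⟩

lemma natMin_right {a b : Nat} (h : b ≤ a) : Nat.min a b = b := Nat.min_eq_right h

lemma natMin_left {a b : Nat} (h : a ≤ b) : Nat.min a b = a := Nat.min_eq_left h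

lemma loopA (events : List (List (String × String))) : ∀ i : Nat, i ≤ 6 →
    (events.foldl (fun (st : String × Nat) event =>
      let tier := sevTiers.getD ((PySem.Dict.mk event).getD "type" "") "low"
      let idx : Nat := match PySem.List.index? tierOrder tier with
        | some i => i
        | none => st.2
      if idx < st.2 then (tier, idx) else st) (tierOrder.getD i "", i)).1
    = tierOrder.getD ((events.map tidx).foldl Nat.min i) "" := by
  induction events with
  | nil => intro i _; simp
  | cons e es ih =>
    intro i hi
    obtain ⟨h6, hidx, hget⟩ := tier_spec e
    simp only [List.foldl_cons, List.map_cons]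
    rw [show (sevTiers.getD ((PySem.Dict.mk e).getD "type" "") "low") = tierOf e from rfl]
    simp only [hidx]
    by_cases hlt : tidx e < i
    · rw [if_pos hlt, show tierOf e = tierOrder.getD (tidx e) "" from hget.symm,
        natMin_right (Nat.le_of_lt hlt), ih (tidx e) h6]
    · rw [if_neg hlt, natMin_left (Nat.le_of_not_lt hlt), ih i hi]

lemma A_eq (events : List (List (String × String))) :
    worst_tier_py events = tierOrder.getD ((events.map tidx).foldl Nat.min 6) "" :=
  loopA events 6 (by omega)

lemma foldl_min_le_init (l : List Nat) : ∀ i, l.foldl Nat.min i ≤ i := by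
  induction l with
  | nil => simp
  | cons x xs ih => intro i; exact le_trans (ih _) (Nat.min_le_left i x)

lemma foldl_min_le_mem (l : List Nat) : ∀ i, ∀ x ∈ l, l.foldl Nat.min i ≤ x := by
  induction l with
  | nil => simp
  | cons y ys ih =>
    intro i x hx
    rcases List.mem_cons.mp hx with rfl | hx
    · exact le_trans (foldl_min_le_init ys _) (Nat.min_le_right i x)
    · exact ih _ x hx

lemma foldl_min_eq_or_mem (l : List Nat) : ∀ i, l.foldl Nat.min i = i ∨ l.foldl Nat.min i ∈ l := by
  induction l with
  | nil => simp
  | cons y ys ih =>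
    intro i
    rcases ih (Nat.min i y) with h | h
    · rcases Nat.le_total i y with hy | hy
      · left; rw [List.foldl_cons, h]; exact natMin_left hy
      · right; rw [List.foldl_cons, h, natMin_right hy]; exact List.mem_cons_self ..
    · right; rw [List.foldl_cons]; exact List.mem_cons_of_mem _ h

lemma present_contains_iff (events : List (List (String × String))) (t : String) :
    PySem.Set.contains (PySem.Set.ofList (events.map (fun event =>
      sevTiers.getD ((PySem.Dict.mk event).getD "type" "") "low"))) t = true
    ↔ ∃ e ∈ events, tierOf e = t := by
  rw [PySem.Set.contains_iff, PySem.Set.mem_ofList]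
  simp [tierOf, eq_comm]

lemma idxOf_getD (k : Nat) (hk : k ≤ 6) : tierOrder.idxOf (tierOrder.getD k "") = k := by
  interval_cases k <;> decide

lemma m_eq (events : List (List (String × String))) (k : Nat) (hk : k ≤ 6)
    (hpk : ∃ e ∈ events, tierOf e = tierOrder.getD k "")
    (hprev : ∀ i, i < k → ¬ ∃ e ∈ events, tierOf e = tierOrder.getD i "") :
    (events.map tidx).foldl Nat.min 6 = k := by
  obtain ⟨e, he, hte⟩ := hpk
  have hle : (events.map tidx).foldl Nat.min 6 ≤ k := by
    have hmem : tidx e ∈ events.map tidx := List.mem_map_of_mem he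
    have := foldl_min_le_mem _ 6 _ hmem
    have htk : tidx e = k := by rw [tidx, hte]; exact idxOf_getD k hk
    omega
  by_contra hne
  have hlt : (events.map tidx).foldl Nat.min 6 < k := lt_of_le_of_ne hle hne
  rcases foldl_min_eq_or_mem (events.map tidx) 6 with h6 | hmem
  · omega
  · obtain ⟨e', he', hte'⟩ := List.mem_map.mp hmem
    apply hprev _ hlt
    refine ⟨e', he', ?_⟩
    rw [← hte']
    exact (tier_spec e').2.2.symm

lemma m_eq_six (events : List (List (String × String)))
    (hprev : ∀ i, i ≤ 6 → ¬ ∃ e ∈ events, tierOf e = tierOrder.getD i "") :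
    (events.map tidx).foldl Nat.min 6 = 6 := by
  rcases foldl_min_eq_or_mem (events.map tidx) 6 with h6 | hmem
  · exact h6
  · obtain ⟨e', he', hte'⟩ := List.mem_map.mp hmem
    have h6' : tidx e' ≤ 6 := (tier_spec e').1
    exfalso
    apply hprev (tidx e') (by omega)
    exact ⟨e', he', (tier_spec e').2.2.symm⟩

-- ===== VERDICT (by name: the statement is the Claim_ definition above) =====
theorem worst_tier_py_spec : Claim_equal_worst_tier_py := by
  intro events _
  unfold Spec_worst_tier_py worst_tier_py_alt
  rw [A_eq]
  have hp := present_contains_iff events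
  simp only [tierOrder, scanTiers]
  split_ifs with h0 h1 h2 h3 h4 h5 h6
  · rw [m_eq events 0 (by omega) ((hp _).mp h0) (by omega)] <;> decide
  · rw [m_eq events 1 (by omega) ((hp _).mp h1)
      (by intro i hi hex; interval_cases i
          · exact h0 ((hp _).mpr hex))] <;> decide
  · rw [m_eq events 2 (by omega) ((hp _).mp h2)
      (by intro i hi hex; interval_cases i
          · exact h0 ((hp _).mpr hex)
          · exact h1 ((hp _).mpr hex))] <;> decide
  · rw [m_eq events 3 (by omega) ((hp _).mp h3)
      (by intro i hi hex; interval_cases i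
          · exact h0 ((hp _).mpr hex)
          · exact h1 ((hp _).mpr hex)
          · exact h2 ((hp _).mpr hex))] <;> decide
  · rw [m_eq events 4 (by omega) ((hp _).mp h4)
      (by intro i hi hex; interval_cases i
          · exact h0 ((hp _).mpr hex)
          · exact h1 ((hp _).mpr hex)
          · exact h2 ((hp _).mpr hex)
          · exact h3 ((hp _).mpr hex))] <;> decide
  · rw [m_eq events 5 (by omega) ((hp _).mp h5)
      (by intro i hi hex; interval_cases i
          · exact h0 ((hp _).mpr hex)
          · exact h1 ((hp _).mpr hex)
          · exact h2 ((hp _).mpr hex)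
          · exact h3 ((hp _).mpr hex)
          · exact h4 ((hp _).mpr hex))] <;> decide
  · rw [m_eq events 6 (by omega) ((hp _).mp h6)
      (by intro i hi hex; interval_cases i
          · exact h0 ((hp _).mpr hex)
          · exact h1 ((hp _).mpr hex)
          · exact h2 ((hp _).mpr hex)
          · exact h3 ((hp _).mpr hex)
          · exact h4 ((hp _).mpr hex)
          · exact h5 ((hp _).mpr hex))] <;> decide
  · rw [m_eq_six events
      (by intro i hi hex; interval_cases i
          · exact h0 ((hp _).mpr hex)
          · exact h1 ((hp _).mpr hex)
          · exact h2 ((hp _).mpr hex)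
          · exact h3 ((hp _).mpr hex)
          · exact h4 ((hp _).mpr hex)
          · exact h5 ((hp _).mpr hex)
          · exact h6 ((hp _).mpr hex))] <;> decide
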